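-- pv_equiv track=rewrite | github.com/blueletter123456789/atc | abc227/b/b.py | is_ng
-- ===== SOURCE A (Python) =====
-- def is_ng(s):
--     for i in range(1, s):
--         t = s - 3*i
--         if t > 0:
--             for j in range(1, t):
--                 if s == 4*i*j + 3*(i+j):
--                     return False
--     return True
-- ===== SOURCE B (Python) =====
-- def is_ng(s):
--     i = 1
--     while 7*i + 3 <= s:
--         if (s - 3*i) % (4*i + 3) == 0:
--             return False
--         i += 1
--     return True
-- ===== Notes on version B (the rewrite author's own statement) =====
-- stated objective: faster
-- what changed: Replaces the nested search over j by a divisibility test per i (since s = 4ij+3(i+j) forces s-3i = j(4i+3)), turning the quadratic double loop into a single linear loop over i with 7i+3 <= s.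
import Mathlib
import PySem

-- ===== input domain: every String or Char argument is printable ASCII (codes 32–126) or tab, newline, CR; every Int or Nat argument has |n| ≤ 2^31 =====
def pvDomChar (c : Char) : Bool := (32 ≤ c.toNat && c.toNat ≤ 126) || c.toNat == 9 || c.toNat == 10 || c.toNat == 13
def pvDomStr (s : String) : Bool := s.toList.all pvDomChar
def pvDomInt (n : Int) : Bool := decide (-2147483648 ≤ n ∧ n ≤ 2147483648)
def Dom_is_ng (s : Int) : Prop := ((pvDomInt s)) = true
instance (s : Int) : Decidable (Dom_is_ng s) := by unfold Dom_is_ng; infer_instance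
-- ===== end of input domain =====

-- B replaces A's nested double loop over (i, j) by a single loop over i testing (4i+3) ∣ (s-3i) (objective: faster).

-- ===== PORT A =====
-- A's early-return-False over two nested ranges = negation of an existence test over the same ranges
def is_ng (s : Int) : Bool :=
  !((PySem.List.pyRange 1 s 1).any (fun i =>
      let t := s - 3*i
      decide (t > 0) &&
        (PySem.List.pyRange 1 t 1).any (fun j => s == 4*i*j + 3*(i+j))))

-- ===== PORT B =====
-- the while loop of Source B, with termination measure s - 7i
def is_ng_altLoop (s i : Int) : Bool :=
  if _h : 7*i + 3 ≤ s then
    if PySem.Int.mod (s - 3*i) (4*i + 3) == 0 then false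
    else is_ng_altLoop s (i + 1)
  else true
termination_by (s - 7*i).toNat
decreasing_by omega

def is_ng_alt (s : Int) : Bool := is_ng_altLoop s 1

-- ===== PRECONDITION & SPEC =====
def Spec_is_ng (s : Int) (out : Bool) : Prop := out = is_ng_alt s
instance (s : Int) (out : Bool) : Decidable (Spec_is_ng s out) := by unfold Spec_is_ng; infer_instance

-- ===== CLAIM (what is proved, stated in full; the proofs are below) =====
def Claim_equal_is_ng : Prop := ∀ (s : Int), Dom_is_ng s → Spec_is_ng s (is_ng s)

-- ===== LEMMAS AND PROOFS =====

-- A's test succeeds iff no pair (i, j) represents s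
theorem is_ng_true_iff (s : Int) :
    is_ng s = true ↔
      ¬ ∃ i : Int, (1 ≤ i ∧ i < s) ∧ s - 3*i > 0 ∧
        ∃ j : Int, (1 ≤ j ∧ j < s - 3*i) ∧ s = 4*i*j + 3*(i+j) := by
  simp [is_ng, PySem.List.mem_pyRange_one, List.any_eq_true]

-- B's loop invariant: altLoop s i succeeds iff no divisor witness with index ≥ i
theorem altLoop_true_iff (s i : Int) :
    is_ng_altLoop s i = true ↔
      ¬ ∃ k : Int, i ≤ k ∧ 7*k + 3 ≤ s ∧ (4*k + 3) ∣ (s - 3*k) := by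
  induction i using is_ng_altLoop.induct (s := s) with
  | case1 i h hm =>
    rw [is_ng_altLoop, dif_pos h, if_pos hm]
    rw [beq_iff_eq] at hm
    exact iff_of_false (by simp)
      (not_not_intro ⟨i, le_refl i, h, (PySem.Int.mod_eq_zero_iff_dvd _ _).mp hm⟩)
  | case2 i h hm ih =>
    rw [is_ng_altLoop, dif_pos h, if_neg hm, ih]
    rw [beq_iff_eq] at hm
    have hnd : ¬ (4*i + 3) ∣ (s - 3*i) := fun hd =>
      hm ((PySem.Int.mod_eq_zero_iff_dvd _ _).mpr hd)
    constructor
    · rintro hno ⟨k, hk1, hk2, hk3⟩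
      rcases eq_or_lt_of_le hk1 with rfl | hlt
      · exact hnd hk3
      · exact hno ⟨k, by omega, hk2, hk3⟩
    · rintro hno ⟨k, hk1, hk2, hk3⟩
      exact hno ⟨k, by omega, hk2, hk3⟩
  | case3 i h =>
    rw [is_ng_altLoop, dif_neg h]
    refine iff_of_true rfl ?_
    rintro ⟨k, hk1, hk2, _⟩
    omega

-- the two existence tests are equivalent
theorem rep_iff (s : Int) :
    (∃ i : Int, (1 ≤ i ∧ i < s) ∧ s - 3*i > 0 ∧
        ∃ j : Int, (1 ≤ j ∧ j < s - 3*i) ∧ s = 4*i*j + 3*(i+j)) ↔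
      (∃ k : Int, 1 ≤ k ∧ 7*k + 3 ≤ s ∧ (4*k + 3) ∣ (s - 3*k)) := by
  constructor
  · rintro ⟨i, ⟨hi1, _⟩, _, j, ⟨hj1, _⟩, he⟩
    refine ⟨i, hi1, ?_, ⟨j, by linarith [he]⟩⟩
    have key : s - (7*i + 3) = (4*i + 3) * (j - 1) := by linarith [he]
    nlinarith [mul_nonneg (by linarith : (0:Int) ≤ 4*i + 3) (by linarith : (0:Int) ≤ j - 1)]
  · rintro ⟨i, hi1, hi2, j, hj⟩
    have hd : (0:Int) < 4*i + 3 := by linarith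
    have hj1 : 1 ≤ j := by
      by_contra hc
      push Not at hc
      nlinarith [mul_nonpos_of_nonneg_of_nonpos (le_of_lt hd) (by omega : j ≤ 0)]
    have ht : s - 3*i = 4*i*j + 3*j := by nlinarith [hj]
    refine ⟨i, ⟨hi1, by omega⟩, by nlinarith, j, ⟨hj1, by nlinarith⟩, by linarith⟩

-- ===== VERDICT (by name: the statement is the Claim_ definition above) =====
theorem is_ng_spec : Claim_equal_is_ng := by
  intro s _
  unfold Spec_is_ng is_ng_alt
  rw [Bool.eq_iff_iff, is_ng_true_iff, altLoop_true_iff]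
  rw [rep_iff]
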